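-- pv_equiv track=rewrite | github.com/ShaharEli/algoTrain | 2021CA/2021CA.py | tree_iter_helper
-- ===== SOURCE A (Python) =====
-- def tree_iter_helper(lst, bound):
--     if not bound:
--         yield ""
--     elif bound == 1:
--         yield from (lett for lett in lst)
--     else:
--         for lett in lst:
--             for prev in tree_iter_helper(lst, bound-1):
--                 yield lett + prev
-- ===== SOURCE B (Python) =====
-- def tree_iter_helper(lst, bound):
--     lst = list(lst)
--     k = len(lst)
--     for i in range(k ** bound):
--         yield ''.join(lst[(i // k ** (bound - 1 - j)) % k] for j in range(bound))
-- ===== Notes on version B (the rewrite author's own statement) =====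
-- stated objective: alternative
-- what changed: Replaces the recursion over bound (with nested generator re-expansion) by a single flat loop over range(k**bound) that decodes each integer as a bound-digit base-k number, most-significant digit first.
-- outside the precondition, e.g. on tree_iter_helper([], -1): A returns [], B raises ZeroDivisionError
import Mathlib
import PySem

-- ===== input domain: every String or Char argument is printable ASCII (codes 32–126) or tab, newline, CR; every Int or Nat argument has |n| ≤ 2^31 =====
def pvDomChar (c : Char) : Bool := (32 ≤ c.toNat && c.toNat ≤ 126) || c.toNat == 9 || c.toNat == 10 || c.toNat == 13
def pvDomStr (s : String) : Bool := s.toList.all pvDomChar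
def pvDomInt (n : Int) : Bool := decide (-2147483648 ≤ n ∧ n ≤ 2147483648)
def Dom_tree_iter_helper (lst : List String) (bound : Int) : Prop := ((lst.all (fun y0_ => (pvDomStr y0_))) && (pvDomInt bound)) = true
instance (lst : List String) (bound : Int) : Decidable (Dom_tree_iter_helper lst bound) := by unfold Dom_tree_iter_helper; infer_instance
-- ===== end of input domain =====

-- B replaces A's recursion over bound by one flat pass over range(k^bound) decoding each
-- integer as a bound-digit base-k numeral (objective: alternative decomposition, same cost).
-- Both Pythons are generators; the equivalence is about the yielded sequence, as a list.

-- ===== PORT A =====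
-- A recurses on bound, which is non-negative on Pre_; fuel = bound.toNat.
def treeA (lst : List String) : Nat → List String
  | 0 => [""]                                    -- if not bound: yield ""
  | 1 => lst.map (fun lett => lett)              -- elif bound == 1: yield from (lett for lett in lst)
  | n + 2 =>                                     -- else: for lett in lst: for prev in rec(bound-1): yield lett + prev
    lst.flatMap (fun lett => (treeA lst (n + 1)).map (fun prev => lett ++ prev))

def tree_iter_helper (lst : List String) (bound : Int) : List String :=
  treeA lst bound.toNat

-- ===== PORT B =====
-- ''.join(parts) = foldl (· ++ ·) "" parts (String.join unfolded; exact for the empty separator).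
-- lst[(i // k**(bound-1-j)) % k]: the index is always in [0, k) when it is reached, so getD is exact.
def decodeB (lst : List String) (n : Nat) (i : Nat) : String :=
  ((List.range n).map (fun j =>
    lst.getD ((i / lst.length ^ (n - 1 - j)) % lst.length) "")).foldl (· ++ ·) ""

def tree_iter_helper_alt (lst : List String) (bound : Int) : List String :=
  (List.range (lst.length ^ bound.toNat)).map (decodeB lst bound.toNat)

-- ===== PRECONDITION & SPEC =====
-- Pre_ excludes negative bound: there A raises RecursionError for nonempty lst and returns []
-- for empty lst only as an accident of the empty loop, while B itself raises (0**negative / float range).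
def Pre_tree_iter_helper (lst : List String) (bound : Int) : Prop := 0 ≤ bound
instance (lst : List String) (bound : Int) : Decidable (Pre_tree_iter_helper lst bound) := by
  unfold Pre_tree_iter_helper; infer_instance

def pvWitness_tree_iter_helper : List String × Int := (["a", "b"], 2)

def Spec_tree_iter_helper (lst : List String) (bound : Int) (out : List String) : Prop :=
  out = tree_iter_helper_alt lst bound
instance (lst : List String) (bound : Int) (out : List String) : Decidable (Spec_tree_iter_helper lst bound out) := by
  unfold Spec_tree_iter_helper; infer_instance

-- ===== CLAIM (what is proved, stated in full; the proofs are below) =====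
def Claim_equal_tree_iter_helper : Prop := ∀ (lst : List String) (bound : Int),
  Dom_tree_iter_helper lst bound → Pre_tree_iter_helper lst bound →
  Spec_tree_iter_helper lst bound (tree_iter_helper lst bound)

-- ===== LEMMAS AND PROOFS =====

theorem foldl_append_init (l : List String) (a : String) :
    l.foldl (· ++ ·) a = a ++ l.foldl (· ++ ·) "" := by
  induction l generalizing a with
  | nil => simp
  | cons x xs ih =>
    simp only [List.foldl_cons]
    rw [ih (a ++ x), ih ("" ++ x), ← String.append_assoc]
    simp

theorem foldl_append_cons (s : String) (l : List String) :
    (s :: l).foldl (· ++ ·) "" = s ++ l.foldl (· ++ ·) "" := by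
  simp only [List.foldl_cons]
  rw [foldl_append_init l ("" ++ s)]
  simp

theorem range_mul_flatMap (k m : Nat) :
    List.range (k * m) = (List.range k).flatMap (fun q => (List.range m).map (fun r => q * m + r)) := by
  induction k with
  | zero => simp
  | succ k ih =>
    rw [Nat.succ_mul, List.range_add, List.range_succ, List.flatMap_append, ← ih]
    simp

theorem map_getD_range (lst : List String) :
    (List.range lst.length).map (fun q => lst.getD q "") = lst := by
  apply List.ext_getElem
  · simp
  · intro i h1 h2
    simp only [List.getElem_map, List.getElem_range]
    exact List.getD_eq_getElem lst "" h2

theorem flatMap_eq_range (lst : List String) (F : String → List String) :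
    lst.flatMap F = (List.range lst.length).flatMap (fun q => F (lst.getD q "")) := by
  conv_lhs => rw [← map_getD_range lst]
  rw [List.flatMap_map]

theorem decodeB_succ (lst : List String) (n q r : Nat)
    (hq : q < lst.length) (hr : r < lst.length ^ n) :
    decodeB lst (n + 1) (q * lst.length ^ n + r) = lst.getD q "" ++ decodeB lst n r := by
  have hk : 0 < lst.length := Nat.lt_of_le_of_lt (Nat.zero_le q) hq
  unfold decodeB
  rw [List.range_succ_eq_map, List.map_cons, foldl_append_cons]
  congr 1
  · -- top digit: (q·kⁿ + r) / kⁿ % k = q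
    have h1 : (q * lst.length ^ n + r) / lst.length ^ n = q := by
      rw [Nat.mul_comm q, Nat.mul_add_div (Nat.pow_pos hk), Nat.div_eq_of_lt hr]
      omega
    simp [h1, Nat.mod_eq_of_lt hq]
  · -- lower digits: digit j+1 of (q·kⁿ + r) at width n+1 = digit j of r at width n
    rw [List.map_map]
    congr 1
    apply List.map_congr_left
    intro j hj
    have hjn : j < n := List.mem_range.mp hj
    have he : n + 1 - 1 - (j + 1) = n - 1 - j := by omega
    set e := n - 1 - j with hedef
    have hen : e < n := by omega
    have hsplit : lst.length ^ n = lst.length ^ e * lst.length ^ (n - e) := by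
      rw [← pow_add]; congr 1; omega
    have hdiv : (q * lst.length ^ n + r) / lst.length ^ e
        = q * lst.length ^ (n - e) + r / lst.length ^ e := by
      have h2 : q * lst.length ^ n + r = r + q * lst.length ^ (n - e) * lst.length ^ e := by
        rw [hsplit]; ring
      rw [h2, Nat.add_mul_div_right _ _ (Nat.pow_pos hk)]
      omega
    have hdvd : lst.length ∣ q * lst.length ^ (n - e) :=
      Dvd.dvd.mul_left (dvd_pow_self lst.length (by omega : n - e ≠ 0)) q
    obtain ⟨c, hc⟩ := hdvd
    simp only [Function.comp, he, hdiv, hc]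
    rw [Nat.mul_add_mod]

theorem treeA_eq (lst : List String) (n : Nat) :
    treeA lst n = (List.range (lst.length ^ n)).map (decodeB lst n) := by
  induction n with
  | zero => simp [treeA, decodeB]
  | succ n ih =>
    cases n with
    | zero =>
      -- bound = 1
      simp only [treeA, List.map_id']
      apply List.ext_getElem
      · simp
      · intro i h1 h2
        have hik : i < lst.length := by simpa using h2
        simp [decodeB, List.range_succ, Nat.mod_eq_of_lt hik, hik]
    | succ m =>
      -- bound = m + 2
      rw [show treeA lst (m + 1 + 1)
          = lst.flatMap (fun lett => (treeA lst (m + 1)).map (fun prev => lett ++ prev)) from rfl,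
        ih, show lst.length ^ (m + 1 + 1) = lst.length * lst.length ^ (m + 1) by ring,
        range_mul_flatMap, List.map_flatMap, flatMap_eq_range lst,
        List.flatMap_def, List.flatMap_def]
      congr 1
      apply List.map_congr_left
      intro q hq
      have hqk : q < lst.length := List.mem_range.mp hq
      simp only [List.map_map]
      apply List.map_congr_left
      intro r hr
      have hrk : r < lst.length ^ (m + 1) := List.mem_range.mp hr
      exact (decodeB_succ lst (m + 1) q r hqk hrk).symm

-- ===== VERDICT (by name: the statement is the Claim_ definition above) =====
theorem tree_iter_helper_spec : Claim_equal_tree_iter_helper := by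
  intro lst bound _ _
  unfold Spec_tree_iter_helper tree_iter_helper tree_iter_helper_alt
  exact treeA_eq lst bound.toNat
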